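-- pv_equiv track=rewrite | github.com/James-J-West/Village | tree.py | find_all_valid_defenses
-- ===== SOURCE A (Python) =====
-- from typing import List, Tuple, Optional, Dict, Union, FrozenSet
--
-- def find_all_valid_defenses(attacking_cards: List[Tuple[int, int]], hand: List[Tuple[int, int]], trump: int) -> List[List[Tuple[int, int]]]:
--     """
--     Finds all possible valid defenses for the given attacking cards.
--
--     Args:
--         attacking_cards (List[Tuple[int, int]]): The attacking cards on the table.
--         hand (List[Tuple[int, int]]): The player's hand.
--         trump (int): The trump suit.
--
--     Returns:
--         List[List[Tuple[int, int]]]: A list of possible defenses, where each defense is a list of cards from the hand.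
--     """
--     all_defenses = []
--
--     def find_defense(index: int, current_defense: List[Tuple[int, int]], used_cards: set):
--         if index == len(attacking_cards):
--             all_defenses.append(current_defense.copy())
--             return
--
--         attack_suit, attack_value = attacking_cards[index]
--         # Adding logic for matching card values to keep all attacking cards OPEN
--         matching_cards = [card for card in hand if card[1] == attack_value and card not in used_cards]
--         if matching_cards:
--             used_cards.add(matching_cards[0])
--             current_defense.append(matching_cards[0])
--             all_defenses.append(current_defense.copy())
--             current_defense.pop()
--             used_cards.remove(matching_cards[0])
--
--         possible_defenses = [card for card in hand if card not in used_cards and (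
--             (card[0] == attack_suit and card[1] > attack_value) or
--             (card[0] == trump and attack_suit != trump)
--         )]
--
--         for defense in possible_defenses:
--             if defense[0] == attack_suit and defense[1] <= attack_value and defense[0] != trump:
--                 continue  # Skip invalid defense
--             used_cards.add(defense)
--             current_defense.append(defense)
--             find_defense(index + 1, current_defense, used_cards)
--             current_defense.pop()
--             used_cards.remove(defense)
--
--     find_defense(0, [], set())
--     return all_defenses
-- ===== SOURCE B (Python) =====
-- def find_all_valid_defenses(attacking_cards, hand, trump):
--     """Iterative re-implementation: explicit stack of (index, defense) frames
--     replacing recursion and shared mutable state; used cards = set(defense)."""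
--     n = len(attacking_cards)
--     out = []
--     stack = [(0, [])]
--     while stack:
--         i, cur = stack.pop()
--         if i == n:
--             out.append(cur)
--             continue
--         suit, val = attacking_cards[i]
--         used = set(cur)
--         for card in hand:
--             if card[1] == val and card not in used:
--                 out.append(cur + [card])
--                 break
--         children = [c for c in hand if c not in used and (
--             (c[0] == suit and c[1] > val) or (c[0] == trump and suit != trump))]
--         for c in reversed(children):
--             stack.append((i + 1, cur + [c]))
--     return out
-- ===== Notes on version B (the rewrite author's own statement) =====
-- stated objective: alternative
-- what changed: Replaces A's nested-function recursion with shared mutable accumulator/used-set by an iterative explicit stack of (index, partial-defense) frames, recovering the used-card set from the partial defense and pushing children in reverse to preserve DFS order; A's unreachable skip-continue branch is dropped.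
import Mathlib
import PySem

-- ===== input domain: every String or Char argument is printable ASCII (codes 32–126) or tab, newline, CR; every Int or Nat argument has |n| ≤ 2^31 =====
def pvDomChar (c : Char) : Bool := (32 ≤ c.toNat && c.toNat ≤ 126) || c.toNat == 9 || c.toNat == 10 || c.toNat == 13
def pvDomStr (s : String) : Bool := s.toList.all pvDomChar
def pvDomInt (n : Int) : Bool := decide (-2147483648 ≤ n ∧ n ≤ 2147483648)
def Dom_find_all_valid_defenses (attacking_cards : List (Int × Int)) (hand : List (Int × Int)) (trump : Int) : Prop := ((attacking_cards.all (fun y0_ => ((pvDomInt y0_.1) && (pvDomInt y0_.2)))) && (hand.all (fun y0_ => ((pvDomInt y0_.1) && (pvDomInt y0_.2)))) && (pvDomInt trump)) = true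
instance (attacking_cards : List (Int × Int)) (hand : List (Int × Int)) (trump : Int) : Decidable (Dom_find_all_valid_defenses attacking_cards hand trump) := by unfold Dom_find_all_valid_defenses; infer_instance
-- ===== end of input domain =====

-- B replaces A's recursive backtracking (shared mutable accumulator / used-set)
-- by an explicit stack of (index, defense) frames; objective: alternative.

-- ===== PORT A =====
-- A's recursion on `index` into attacking_cards is ported as the obvious
-- structural recursion on the remaining suffix of attacking_cards; the inner
-- `for defense in possible_defenses` loop is the mutual helper `pvLoopA`.
mutual
def pvGoA (hand : List (Int × Int)) (trump : Int) :
    List (Int × Int) → List (Int × Int) → PySem.Set (Int × Int) →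
    List (List (Int × Int)) → List (List (Int × Int))
  | [], cur, _, acc => acc ++ [cur]
  | a :: restAtk, cur, used, acc =>
    let matching := hand.filter (fun c => c.2 == a.2 && !(PySem.Set.contains used c))
    let acc1 := match matching with
      | [] => acc
      | m :: _ => acc ++ [cur ++ [m]]
    let possible := hand.filter (fun c => !(PySem.Set.contains used c) &&
      ((c.1 == a.1 && c.2 > a.2) || (c.1 == trump && a.1 != trump)))
    pvLoopA hand trump a restAtk possible cur used acc1
termination_by atk _ _ _ => (atk.length, 1, 0)
decreasing_by exact Prod.Lex.right _ (Prod.Lex.left _ _ (by omega))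

def pvLoopA (hand : List (Int × Int)) (trump : Int) (a : Int × Int) (restAtk : List (Int × Int)) :
    List (Int × Int) → List (Int × Int) → PySem.Set (Int × Int) →
    List (List (Int × Int)) → List (List (Int × Int))
  | [], _, _, acc => acc
  | d :: rem, cur, used, acc =>
    let acc' := if d.1 == a.1 && d.2 ≤ a.2 && d.1 != trump then acc  -- `continue`
      else pvGoA hand trump restAtk (cur ++ [d]) (PySem.Set.add used d) acc
    pvLoopA hand trump a restAtk rem cur used acc'
termination_by rem _ _ _ => (restAtk.length + 1, 0, rem.length)
decreasing_by
  · exact Prod.Lex.left _ _ (by omega)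
  · exact Prod.Lex.right _ (Prod.Lex.right _ (by simp only [List.length_cons]; omega))
end
def find_all_valid_defenses (attacking_cards : List (Int × Int)) (hand : List (Int × Int)) (trump : Int) : List (List (Int × Int)) :=
  pvGoA hand trump attacking_cards [] PySem.Set.empty []

-- ===== PORT B =====
-- Port of Source B's while-loop; the stack's top is the list head (Python pops and
-- appends at the right end, here at the front), so Source B's `for c in
-- reversed(children): stack.append(...)` is the reverse/foldl push below.
-- The `for card in hand: … break` search is List.find?.  Frames with
-- i > length never occur (every pushed frame has i ≤ length); the port drops
-- them, and `pvMuB` is the termination measure of the while-loop.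
def pvMuB (H L : Nat) (st : List (Nat × List (Int × Int))) : Nat :=
  (st.map (fun f => (H + 2) ^ (L - f.1))).sum

theorem pvFoldPush (i : Nat) (cur : List (Int × Int)) :
    ∀ (l : List (Int × Int)) (st : List (Nat × List (Int × Int))),
      l.foldl (fun st c => (i + 1, cur ++ [c]) :: st) st
        = l.reverse.map (fun c => (i + 1, cur ++ [c])) ++ st := by
  intro l
  induction l with
  | nil => intro st; simp
  | cons x xs ih => intro st; simp [ih]

theorem pvMuStep (H L i : Nat) (hi : i < L) (ch : List (Int × Int))
    (hch : ch.length ≤ H) (cur : List (Int × Int))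
    (rest : List (Nat × List (Int × Int))) :
    pvMuB H L (ch.map (fun c => (i + 1, cur ++ [c])) ++ rest)
      < pvMuB H L ((i, cur) :: rest) := by
  simp only [pvMuB, List.map_append, List.sum_append, List.map_map,
    List.map_cons, List.sum_cons]
  have hmap : ∀ (l : List (Int × Int)),
      (l.map ((fun f => (H + 2) ^ (L - f.1)) ∘ (fun c => (i + 1, cur ++ [c])))).sum
        = l.length * (H + 2) ^ (L - (i + 1)) := by
    intro l; induction l with
    | nil => simp
    | cons x xs ih => simp [ih, Nat.succ_mul, Nat.add_comm]
  rw [hmap]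
  have hpos : 0 < (H + 2) ^ (L - (i + 1)) := Nat.pow_pos (by omega)
  have hbig : (H + 1) * (H + 2) ^ (L - (i + 1)) < (H + 2) ^ (L - i) := by
    have hexp : L - i = (L - (i + 1)) + 1 := by omega
    rw [hexp, pow_succ]
    calc (H + 1) * (H + 2) ^ (L - (i + 1))
        = (H + 2) ^ (L - (i + 1)) * (H + 1) := by ring
      _ < (H + 2) ^ (L - (i + 1)) * (H + 2) :=
          Nat.mul_lt_mul_of_le_of_lt (le_refl _) (by omega) hpos
  have hle := Nat.mul_le_mul_right ((H + 2) ^ (L - (i + 1))) hch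
  have hsplit : (H + 1) * (H + 2) ^ (L - (i + 1))
      = H * (H + 2) ^ (L - (i + 1)) + (H + 2) ^ (L - (i + 1)) := by ring
  omega

def pvLoopB (ac hand : List (Int × Int)) (trump : Int) :
    List (Nat × List (Int × Int)) → List (List (Int × Int)) → List (List (Int × Int))
  | [], out => out
  | (i, cur) :: rest, out =>
    if i = ac.length then pvLoopB ac hand trump rest (out ++ [cur])
    else match h : ac[i]? with
    | none => pvLoopB ac hand trump rest out  -- unreachable: frames satisfy i ≤ length
    | some a =>
      let used := PySem.Set.ofList cur
      let out1 := match hand.find? (fun c => c.2 == a.2 && !(PySem.Set.contains used c)) with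
        | none => out
        | some m => out ++ [cur ++ [m]]
      let children := hand.filter (fun c => !(PySem.Set.contains used c) &&
        ((c.1 == a.1 && c.2 > a.2) || (c.1 == trump && a.1 != trump)))
      pvLoopB ac hand trump
        (children.reverse.foldl (fun st c => (i + 1, cur ++ [c]) :: st) rest) out1
termination_by st _ => pvMuB hand.length ac.length st
decreasing_by
  · simp only [pvMuB, List.map_cons, List.sum_cons]
    have : 0 < (hand.length + 2) ^ (ac.length - i) := Nat.pow_pos (by omega)
    omega
  · simp only [pvMuB, List.map_cons, List.sum_cons]
    have : 0 < (hand.length + 2) ^ (ac.length - i) := Nat.pow_pos (by omega)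
    omega
  · have hi : i < ac.length := (List.getElem?_eq_some_iff.mp h).1
    rw [pvFoldPush, List.reverse_reverse]
    refine pvMuStep hand.length ac.length i hi _ ?_ cur rest
    simpa using List.length_filter_le _ hand.attach

def find_all_valid_defenses_alt (attacking_cards : List (Int × Int)) (hand : List (Int × Int)) (trump : Int) : List (List (Int × Int)) :=
  pvLoopB attacking_cards hand trump [(0, [])] []

-- ===== PRECONDITION & SPEC =====
def Spec_find_all_valid_defenses (attacking_cards : List (Int × Int)) (hand : List (Int × Int)) (trump : Int) (out : List (List (Int × Int))) : Prop := out = find_all_valid_defenses_alt attacking_cards hand trump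
instance (attacking_cards : List (Int × Int)) (hand : List (Int × Int)) (trump : Int) (out : List (List (Int × Int))) : Decidable (Spec_find_all_valid_defenses attacking_cards hand trump out) := by unfold Spec_find_all_valid_defenses; infer_instance

-- ===== CLAIM (what is proved, stated in full; the proofs are below) =====
def Claim_equal_find_all_valid_defenses : Prop := ∀ (attacking_cards : List (Int × Int)) (hand : List (Int × Int)) (trump : Int), Dom_find_all_valid_defenses attacking_cards hand trump → Spec_find_all_valid_defenses attacking_cards hand trump (find_all_valid_defenses attacking_cards hand trump)

-- ===== LEMMAS AND PROOFS =====

-- The common pure denotation of both ports: DFS over the attacking suffix,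
-- with the used-card set recovered from the accumulated defense `cur`.
def pvDfs (hand : List (Int × Int)) (trump : Int) :
    List (Int × Int) → List (Int × Int) → List (List (Int × Int))
  | [], cur => [cur]
  | a :: restAtk, cur =>
    let used := PySem.Set.ofList cur
    let emit := match hand.find? (fun c => c.2 == a.2 && !(PySem.Set.contains used c)) with
      | none => ([] : List (List (Int × Int)))
      | some m => [cur ++ [m]]
    let children := hand.filter (fun c => !(PySem.Set.contains used c) &&
      ((c.1 == a.1 && c.2 > a.2) || (c.1 == trump && a.1 != trump)))
    emit ++ (children.map (fun c => pvDfs hand trump restAtk (cur ++ [c]))).flatten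

theorem pvFindFilter {α : Type} (p : α → Bool) :
    ∀ l : List α, l.find? p = (l.filter p).head? := by
  intro l
  induction l with
  | nil => rfl
  | cons x xs ih =>
    rw [List.find?_cons, List.filter_cons]
    by_cases h : p x = true
    · simp [h]
    · simp only [Bool.not_eq_true] at h
      rw [h, ih]
      simp

-- A's used-set always has the same members as the accumulated defense.
theorem pvGoA_eq_dfs (hand : List (Int × Int)) (trump : Int) :
    ∀ (atk cur : List (Int × Int)) (used : PySem.Set (Int × Int))
      (acc : List (List (Int × Int))),
      (∀ c, PySem.Set.contains used c
            = PySem.Set.contains (PySem.Set.ofList cur) c) →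
      pvGoA hand trump atk cur used acc = acc ++ pvDfs hand trump atk cur := by
  intro atk
  induction atk with
  | nil =>
    intro cur used acc _
    rw [pvGoA, pvDfs]
  | cons a restAtk ih =>
    intro cur used acc hused
    have hc : PySem.Set.contains used
        = PySem.Set.contains (PySem.Set.ofList cur) := funext hused
    have hloop : ∀ (rem : List (Int × Int)) (acc : List (List (Int × Int))),
        pvLoopA hand trump a restAtk rem cur used acc
          = acc ++ (rem.map (fun d =>
              if d.1 == a.1 && d.2 ≤ a.2 && d.1 != trump then []
              else pvDfs hand trump restAtk (cur ++ [d]))).flatten := by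
      intro rem
      induction rem with
      | nil => intro acc; rw [pvLoopA]; simp
      | cons d rem ihR =>
        intro acc
        rw [pvLoopA, ihR, List.map_cons, List.flatten_cons]
        have hmem : ∀ c, PySem.Set.contains (PySem.Set.add used d) c
            = PySem.Set.contains (PySem.Set.ofList (cur ++ [d])) c := by
          intro c
          rw [Bool.eq_iff_iff, PySem.Set.contains_iff, PySem.Set.contains_iff,
            PySem.Set.mem_add, PySem.Set.mem_ofList, List.mem_append,
            List.mem_singleton]
          have h1 : c ∈ used ↔ c ∈ cur := by
            rw [← PySem.Set.contains_iff, ← PySem.Set.mem_ofList (xs := cur),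
              ← PySem.Set.contains_iff, hused c]
          tauto
        cases hskip : (d.1 == a.1 && d.2 ≤ a.2 && d.1 != trump) with
        | true => simp
        | false =>
          simp only [Bool.false_eq_true, ite_false]
          rw [ih (cur ++ [d]) (PySem.Set.add used d) acc hmem]
          simp [List.append_assoc]
    simp only [pvGoA]
    rw [hc, hloop, pvDfs]
    simp only [pvFindFilter]
    have hskipf : ∀ c ∈ hand.filter (fun c =>
        !(PySem.Set.contains (PySem.Set.ofList cur) c) &&
        ((c.1 == a.1 && c.2 > a.2) || (c.1 == trump && a.1 != trump))),
        (c.1 == a.1 && c.2 ≤ a.2 && c.1 != trump) = false := by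
      intro c hcm
      have h2 := (List.mem_filter.mp hcm).2
      simp only [Bool.and_eq_true, Bool.or_eq_true, beq_iff_eq, bne_iff_ne,
        decide_eq_true_eq] at h2
      rcases h2 with ⟨-, (⟨he, hg⟩ | ⟨ht, hn⟩)⟩
      · have : ¬ (c.2 ≤ a.2) := by omega
        simp [this]
      · simp [ht]
    rw [List.map_congr_left (fun c hcm => by rw [if_neg (by simp [hskipf c hcm])])]
    cases hm : hand.filter (fun c => c.2 == a.2 &&
        !(PySem.Set.contains (PySem.Set.ofList cur) c)) with
    | nil => simp
    | cons m ms => simp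

theorem pvLoopB_eq (ac hand : List (Int × Int)) (trump : Int) :
    ∀ (st : List (Nat × List (Int × Int))) (out : List (List (Int × Int))),
      (∀ f ∈ st, f.1 ≤ ac.length) →
      pvLoopB ac hand trump st out
        = out ++ (st.map (fun f => pvDfs hand trump (ac.drop f.1) f.2)).flatten := by
  suffices H : ∀ (n : Nat) (st : List (Nat × List (Int × Int)))
      (out : List (List (Int × Int))),
      pvMuB hand.length ac.length st ≤ n →
      (∀ f ∈ st, f.1 ≤ ac.length) →
      pvLoopB ac hand trump st out
        = out ++ (st.map (fun f => pvDfs hand trump (ac.drop f.1) f.2)).flatten by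
    intro st out h
    exact H (pvMuB hand.length ac.length st) st out le_rfl h
  intro n
  induction n with
  | zero =>
    intro st out hmu h
    match st with
    | [] => rw [pvLoopB]; simp
    | (i, cur) :: rest =>
      exfalso
      have : 0 < (hand.length + 2) ^ (ac.length - i) := Nat.pow_pos (by omega)
      simp only [pvMuB, List.map_cons, List.sum_cons] at hmu
      omega
  | succ n ihn =>
    intro st out hmu h
    match st with
    | [] => rw [pvLoopB]; simp
    | (i, cur) :: rest =>
      rw [pvLoopB]
      have hw : 0 < (hand.length + 2) ^ (ac.length - i) := Nat.pow_pos (by omega)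
      by_cases hi : i = ac.length
      · rw [if_pos hi]
        rw [ihn rest (out ++ [cur]) (by
            simp only [pvMuB, List.map_cons, List.sum_cons] at hmu ⊢; omega)
          (fun f hf => h f (List.mem_cons_of_mem _ hf))]
        subst hi
        simp [pvDfs, List.drop_length]
      · rw [if_neg hi]
        split
        next heq =>
          exfalso
          have h1 := h (i, cur) (by simp)
          have h2 := List.getElem?_eq_none_iff.mp heq
          simp at h1
          omega
        next a heq =>
          have hlt : i < ac.length := (List.getElem?_eq_some_iff.mp heq).1
          have hval : ac[i] = a := (List.getElem?_eq_some_iff.mp heq).2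
          simp only [pvFoldPush, List.reverse_reverse]
          have hmu' : pvMuB hand.length ac.length
              (((hand.filter (fun c => !(PySem.Set.contains (PySem.Set.ofList cur) c) &&
                ((c.1 == a.1 && c.2 > a.2) || (c.1 == trump && a.1 != trump)))).map
                  (fun c => (i + 1, cur ++ [c]))) ++ rest) ≤ n := by
            have := pvMuStep hand.length ac.length i hlt
              (hand.filter (fun c => !(PySem.Set.contains (PySem.Set.ofList cur) c) &&
                ((c.1 == a.1 && c.2 > a.2) || (c.1 == trump && a.1 != trump))))
              (List.length_filter_le _ _) cur rest
            omega
          rw [ihn _ _ hmu' (by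
            intro f hf
            rcases List.mem_append.mp hf with hf1 | hf2
            · rcases List.mem_map.mp hf1 with ⟨c, -, rfl⟩
              simpa using hlt
            · exact h f (List.mem_cons_of_mem _ hf2))]
          have hdrop : ac.drop i = a :: ac.drop (i + 1) := by
            rw [List.drop_eq_getElem_cons hlt, hval]
          simp only [List.map_cons, List.flatten_cons, hdrop, pvDfs,
            List.map_append, List.flatten_append, List.map_map]
          cases hfind : hand.find? (fun c => c.2 == a.2 &&
              !(PySem.Set.contains (PySem.Set.ofList cur) c)) with
          | none => simp [Function.comp_def]
          | some m => simp [Function.comp_def]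

theorem find_all_valid_defenses_spec : Claim_equal_find_all_valid_defenses := by
  unfold Claim_equal_find_all_valid_defenses
  intro ac hand trump _
  unfold Spec_find_all_valid_defenses find_all_valid_defenses find_all_valid_defenses_alt
  rw [pvGoA_eq_dfs hand trump ac [] PySem.Set.empty [] (fun c => rfl)]
  rw [pvLoopB_eq ac hand trump [(0, [])] [] (by intro f hf; simp at hf; simp [hf])]
  simp
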